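-- pv_equiv track=rewrite | github.com/pypi-data/pypi-mirror-310 | packages/xython/xython-3.2.1-py3-none-any.whl/xython/youtil.py | mix_two_list_as_beside
-- ===== SOURCE A (Python) =====
-- def mix_two_list_as_beside(input_list_2d_1, input_list_2d_2):
-- 	"""
-- 	맨앞의 자료가 같다는 가정에서 하는것
-- 	제목부분은 고유한 자료여야 한다
-- 	자료가 없거나 값이 없을때 붙이는 빈자료를 위해 만든것
--
-- 	:param input_list_2d_1:
-- 	:param input_list_2d_2:
-- 	:return:
-- 	"""
-- 	no_of_list_2d_1 = len(input_list_2d_1[0]) - 1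
-- 	no_of_list_2d_2 = len(input_list_2d_2[0]) - 1
-- 	empty_list_2d_1 = [""] * no_of_list_2d_1
-- 	empty_list_2d_2 = [""] * no_of_list_2d_2
-- 	# 리스트형태로는 코드가 더 길어질것으로 보여서 입력자료를 사전으로 변경 한것
-- 	temp_dic = {}
-- 	for one in input_list_2d_1:
-- 		temp_dic[one[0]] = one[1:]
-- 	checked_list = []
-- 	# 기준이 되는 자료에 항목이 있을때
-- 	for one in input_list_2d_2:
-- 		if one[0] in temp_dic.keys():
-- 			temp_dic[one[0]] = list(temp_dic[one[0]]) + list(one[1:])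
-- 		else:
-- 			temp_dic[one[0]] = empty_list_2d_1 + list(one[1:])
-- 		checked_list.append(one[0])
-- 	# 기준자료에 항목이 없는것에 대한것
-- 	for one in temp_dic.keys():
-- 		if not one in checked_list:
-- 			temp_dic[one] = list(temp_dic[one]) + empty_list_2d_2
-- 	# 사전형식을 리스트로 다시 만드는것
-- 	result = []
-- 	for one in temp_dic:
-- 		result.append([one] + list(temp_dic[one]))
-- 	return result
-- ===== SOURCE B (Python) =====
-- def mix_two_list_as_beside(input_list_2d_1, input_list_2d_2):
--     n1 = len(input_list_2d_1[0]) - 1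
--     n2 = len(input_list_2d_2[0]) - 1
--     left = {}
--     for row in input_list_2d_1:
--         left[row[0]] = row[1:]
--     right = {}
--     for row in input_list_2d_2:
--         right[row[0]] = right.get(row[0], []) + row[1:]
--     keys = list(left) + [k for k in right if k not in left]
--     return [[k] + left.get(k, [""] * n1) + right.get(k, [""] * n2) for k in keys]
-- ===== Notes on version B (the rewrite author's own statement) =====
-- stated objective: simpler
-- what changed: A threads one shared dict through three mutating passes (seed from list1, merge/concatenate list2 rows into it while tracking a checked_list, then pad unchecked keys); B instead builds two independent lookup tables (left: last-value-wins over list1; right: concatenating accumulator over list2), forms the ordered key list, and emits each output row in a single final comprehension with get-with-default padding.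
import Mathlib
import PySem

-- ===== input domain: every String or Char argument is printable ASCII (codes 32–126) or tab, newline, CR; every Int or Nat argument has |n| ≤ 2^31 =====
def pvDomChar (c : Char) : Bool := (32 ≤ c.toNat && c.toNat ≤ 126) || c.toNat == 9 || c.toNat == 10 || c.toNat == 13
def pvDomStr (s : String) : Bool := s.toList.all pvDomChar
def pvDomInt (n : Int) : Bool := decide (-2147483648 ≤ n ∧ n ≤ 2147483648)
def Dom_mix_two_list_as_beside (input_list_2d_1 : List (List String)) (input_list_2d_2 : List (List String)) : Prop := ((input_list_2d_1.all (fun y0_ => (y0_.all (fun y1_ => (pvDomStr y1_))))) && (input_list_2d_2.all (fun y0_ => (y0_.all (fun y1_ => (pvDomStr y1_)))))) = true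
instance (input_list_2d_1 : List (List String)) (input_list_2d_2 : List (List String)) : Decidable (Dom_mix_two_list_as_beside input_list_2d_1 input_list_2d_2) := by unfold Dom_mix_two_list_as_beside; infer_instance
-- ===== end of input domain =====

-- B replaces A's three mutating passes over one shared dict by two independent lookup
-- tables (left/right) merged in a single final comprehension (objective: simpler).

-- ===== PORT A =====
-- literal port of A; the `.getD` defaults on xs[0]/one[0] are reached only outside Pre_
def mix_two_list_as_beside (input_list_2d_1 : List (List String)) (input_list_2d_2 : List (List String)) : List (List String) :=
  let no1 : Int := (((PySem.List.pyGet? input_list_2d_1 0).getD []).length : Int) - 1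
  let no2 : Int := (((PySem.List.pyGet? input_list_2d_2 0).getD []).length : Int) - 1
  let empty1 : List String := List.replicate no1.toNat ""
  let empty2 : List String := List.replicate no2.toNat ""
  let tempDic : PySem.Dict String (List String) :=
    input_list_2d_1.foldl (fun d one =>
      d.insert ((PySem.List.pyGet? one 0).getD "") (PySem.List.slice one (some 1) none))
      PySem.Dict.empty
  let st : PySem.Dict String (List String) × List String :=
    input_list_2d_2.foldl (fun st one =>
      let k := (PySem.List.pyGet? one 0).getD ""
      let d := st.1
      let d' := if d.contains k then d.insert k (d.getD k [] ++ PySem.List.slice one (some 1) none)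
                else d.insert k (empty1 ++ PySem.List.slice one (some 1) none)
      (d', st.2 ++ [k])) (tempDic, [])
  let d2 : PySem.Dict String (List String) :=
    st.1.keys.foldl (fun d one =>
      if st.2.contains one then d else d.insert one (d.getD one [] ++ empty2)) st.1
  d2.keys.foldl (fun result one => result ++ [[one] ++ d2.getD one []]) []

-- ===== PORT B =====
-- literal port of Source B
def mix_two_list_as_beside_alt (input_list_2d_1 : List (List String)) (input_list_2d_2 : List (List String)) : List (List String) :=
  let n1 : Int := (((PySem.List.pyGet? input_list_2d_1 0).getD []).length : Int) - 1
  let n2 : Int := (((PySem.List.pyGet? input_list_2d_2 0).getD []).length : Int) - 1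
  let left : PySem.Dict String (List String) :=
    input_list_2d_1.foldl (fun d row =>
      d.insert ((PySem.List.pyGet? row 0).getD "") (PySem.List.slice row (some 1) none))
      PySem.Dict.empty
  let right : PySem.Dict String (List String) :=
    input_list_2d_2.foldl (fun d row =>
      let k := (PySem.List.pyGet? row 0).getD ""
      d.insert k (d.getD k [] ++ PySem.List.slice row (some 1) none))
      PySem.Dict.empty
  let keys : List String := left.keys ++ right.keys.filter (fun k => !left.contains k)
  keys.map (fun k =>
    [k] ++ left.getD k (List.replicate n1.toNat "") ++ right.getD k (List.replicate n2.toNat ""))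

-- ===== PRECONDITION & SPEC =====
-- Pre_ excludes exactly the inputs on which the Python A raises IndexError:
-- an empty outer list (input[0]) or an empty row (one[0]).
def Pre_mix_two_list_as_beside (input_list_2d_1 : List (List String)) (input_list_2d_2 : List (List String)) : Prop :=
  input_list_2d_1 ≠ [] ∧ input_list_2d_2 ≠ [] ∧
  (∀ r ∈ input_list_2d_1, r ≠ []) ∧ (∀ r ∈ input_list_2d_2, r ≠ [])
instance (input_list_2d_1 : List (List String)) (input_list_2d_2 : List (List String)) : Decidable (Pre_mix_two_list_as_beside input_list_2d_1 input_list_2d_2) := by unfold Pre_mix_two_list_as_beside; infer_instance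
def pvWitness_mix_two_list_as_beside : List (List String) × List (List String) := ([["a", "x"]], [["b", "y"]])

def Spec_mix_two_list_as_beside (input_list_2d_1 : List (List String)) (input_list_2d_2 : List (List String)) (out : List (List String)) : Prop := out = mix_two_list_as_beside_alt input_list_2d_1 input_list_2d_2
instance (input_list_2d_1 : List (List String)) (input_list_2d_2 : List (List String)) (out : List (List String)) : Decidable (Spec_mix_two_list_as_beside input_list_2d_1 input_list_2d_2 out) := by unfold Spec_mix_two_list_as_beside; infer_instance

-- ===== CLAIM (what is proved, stated in full; the proofs are below) =====
def Claim_equal_mix_two_list_as_beside : Prop := ∀ (input_list_2d_1 : List (List String)) (input_list_2d_2 : List (List String)), Dom_mix_two_list_as_beside input_list_2d_1 input_list_2d_2 → Pre_mix_two_list_as_beside input_list_2d_1 input_list_2d_2 → Spec_mix_two_list_as_beside input_list_2d_1 input_list_2d_2 (mix_two_list_as_beside input_list_2d_1 input_list_2d_2)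

-- ===== LEMMAS AND PROOFS =====

def pvMerge (e1 : List String) (L R : PySem.Dict String (List String)) :
    PySem.Dict String (List String) :=
  ⟨L.items.map (fun q => (q.1, q.2 ++ R.getD q.1 [])) ++
   (R.items.filter (fun q => !L.contains q.1)).map (fun q => (q.1, e1 ++ q.2))⟩

theorem pvMerge_empty (e1 : List String) (L : PySem.Dict String (List String)) :
    pvMerge e1 L PySem.Dict.empty = L := by
  apply PySem.Dict.ext
  simp [pvMerge, PySem.Dict.empty, PySem.Dict.getD, PySem.Dict.get?]

theorem pvMerge_contains (e1 : List String) (L R : PySem.Dict String (List String)) (k : String) :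
    (pvMerge e1 L R).contains k = (L.contains k || R.contains k) := by
  rw [Bool.eq_iff_iff]
  simp only [pvMerge, PySem.Dict.contains, List.any_append, List.any_map, List.any_filter,
    Function.comp_def, Bool.or_eq_true, List.any_eq_true, beq_iff_eq, Bool.and_eq_true,
    Bool.not_eq_true', List.any_eq_false]
  constructor
  · rintro (h | ⟨a, ha, h1, h2⟩)
    · exact Or.inl h
    · exact Or.inr ⟨a, ha, h2⟩
  · rintro (h | ⟨a, ha, h2⟩)
    · exact Or.inl h
    · by_cases hl : ∃ q ∈ L.items, q.1 = k
      · obtain ⟨q, hq, hqk⟩ := hl; exact Or.inl ⟨q, hq, hqk⟩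
      · push Not at hl
        refine Or.inr ⟨a, ha, ?_, h2⟩
        intro p hp
        rw [h2]
        exact hl p hp

theorem pvRight_find? (e1 : List String) (L R : PySem.Dict String (List String)) (k : String)
    (h : L.contains k = false) :
    ((R.items.filter (fun q => !L.contains q.1)).map (fun q => (q.1, e1 ++ q.2))).find?
        (fun q => q.1 == k)
      = (R.items.find? (fun q => q.1 == k)).map (fun q => (q.1, e1 ++ q.2)) := by
  induction R.items with
  | nil => simp
  | cons a l ih =>
    by_cases hk : a.1 = k
    · have : L.contains a.1 = false := by rw [hk]; exact h
      simp [List.filter_cons, this, hk, h, Function.comp_def]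
    · by_cases hc : L.contains a.1 = true
      · simp [List.filter_cons, hc, List.find?_cons, hk, ih]
      · simp only [Bool.not_eq_true] at hc
        simp [List.filter_cons, hc, List.find?_cons, hk, ih]

theorem pvMerge_get? (e1 : List String) (L R : PySem.Dict String (List String)) (k : String) :
    (pvMerge e1 L R).get? k =
      match L.get? k with
      | some v => some (v ++ R.getD k [])
      | none => (R.get? k).map (fun v => e1 ++ v) := by
  have hLpart : (L.items.map (fun q => (q.1, q.2 ++ R.getD q.1 []))).find? (fun p => p.1 == k)
      = (L.items.find? (fun q => q.1 == k)).map (fun q => (q.1, q.2 ++ R.getD q.1 [])) := by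
    rw [List.find?_map]
    rfl
  have hitems : (pvMerge e1 L R).items
      = L.items.map (fun q => (q.1, q.2 ++ R.getD q.1 [])) ++
        (R.items.filter (fun q => !L.contains q.1)).map (fun q => (q.1, e1 ++ q.2)) := rfl
  cases hf : L.items.find? (fun q => q.1 == k) with
  | some q =>
    have hq : q.1 = k := by
      have h2 := List.find?_some hf
      exact eq_of_beq h2
    have hLget : L.get? k = some q.2 := by
      simp only [PySem.Dict.get?, hf, Option.map_some]
    simp only [PySem.Dict.get?, hitems, List.find?_append, hLpart, hf, Option.map_some,
      Option.some_or, hLget, hq]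
  | none =>
    have hc : L.contains k = false := by
      simp only [PySem.Dict.contains]
      rw [List.any_eq_false]
      intro p hp
      simpa using List.find?_eq_none.mp hf p hp
    have hLget : L.get? k = none := by
      simp only [PySem.Dict.get?, hf, Option.map_none]
    simp only [PySem.Dict.get?, hitems, List.find?_append, hLpart, hf, Option.map_none,
      Option.none_or, pvRight_find? e1 L R k hc, Option.map_map, hLget]
    rfl

def pvStepA (e1 : List String) (st : PySem.Dict String (List String) × List String)
    (p : String × List String) : PySem.Dict String (List String) × List String :=
  (if st.1.contains p.1 then st.1.insert p.1 (st.1.getD p.1 [] ++ p.2)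
   else st.1.insert p.1 (e1 ++ p.2),
   st.2 ++ [p.1])

def pvStepB (d : PySem.Dict String (List String)) (p : String × List String) :
    PySem.Dict String (List String) :=
  d.insert p.1 (d.getD p.1 [] ++ p.2)

theorem pvNotMem_of_get?_none {L : PySem.Dict String (List String)} {k : String}
    (h : L.get? k = none) : ∀ q ∈ L.items, q.1 ≠ k := by
  intro q hq hqk
  have h0 : List.find? (fun p => (p.1 : String) == k) L.items = none := by
    cases hfind : List.find? (fun p => (p.1 : String) == k) L.items with
    | none => rfl
    | some a => simp [PySem.Dict.get?, hfind] at h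
  have := List.find?_eq_none.mp h0 q hq
  simp [hqk] at this

theorem pvContains_false_of_get?_none {L : PySem.Dict String (List String)} {k : String}
    (h : L.get? k = none) : L.contains k = false := by
  rw [PySem.Dict.contains_eq_isSome_get?, h]; rfl

theorem pvContains_true_of_get?_some {L : PySem.Dict String (List String)} {k : String}
    {v : List String} (h : L.get? k = some v) : L.contains k = true := by
  rw [PySem.Dict.contains_eq_isSome_get?, h]; rfl

theorem pvVal_of_mem {L : PySem.Dict String (List String)} {k : String} {v : List String}
    (hL : L.keys.Nodup) (h : L.get? k = some v) :
    ∀ q ∈ L.items, q.1 = k → q.2 = v := by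
  rintro ⟨a, b⟩ hq hqk
  simp only at hqk
  subst hqk
  have h2 : L.get? a = some b := PySem.Dict.get?_of_mem_items L hq hL
  rw [h] at h2
  exact (Option.some_inj.mp h2).symm

theorem pvFilter_insert (L R : PySem.Dict String (List String)) (k : String) (w : List String)
    (hc1 : L.contains k = true) :
    (R.insert k w).items.filter (fun q => !L.contains q.1)
      = R.items.filter (fun q => !L.contains q.1) := by
  by_cases hc2 : R.contains k = true
  · rw [PySem.Dict.items_insert_of_contains _ _ hc2]
    rw [List.filter_map]
    have hpred : ∀ q ∈ R.items,
        ((fun q => !L.contains q.1) ∘ (fun p => if p.1 == k then (k, w) else p)) q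
          = (fun q => !L.contains q.1) q := by
      intro q hq
      by_cases hqk : q.1 = k
      · simp [Function.comp_def, hqk, hc1]
      · simp [Function.comp_def, hqk]
    rw [List.filter_congr hpred]
    have hid : ∀ q ∈ R.items.filter (fun q => !L.contains q.1),
        (fun p : String × List String => if (p.1 == k) = true then (k, w) else p) q = id q := by
      intro q hq
      have hkeep := List.of_mem_filter hq
      have hqk : q.1 ≠ k := by
        intro h; rw [h, hc1] at hkeep; simp at hkeep
      simp [hqk]
    rw [List.map_congr_left hid, List.map_id]
  · simp only [Bool.not_eq_true] at hc2
    rw [PySem.Dict.items_insert_of_not_contains _ _ hc2, List.filter_append]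
    simp [hc1]

theorem pvMerge_step (e1 : List String) (L R : PySem.Dict String (List String))
    (ck : List String) (p : String × List String)
    (hL : L.keys.Nodup) (hR : R.keys.Nodup) :
    pvStepA e1 (pvMerge e1 L R, ck) p = (pvMerge e1 L (pvStepB R p), ck ++ [p.1]) := by
  obtain ⟨k, t⟩ := p
  simp only [pvStepA, pvStepB]
  refine Prod.ext ?_ rfl
  simp only
  cases hLg : L.get? k with
  | some v =>
    have hc1 := pvContains_true_of_get?_some hLg
    have hcM : (pvMerge e1 L R).contains k = true := by
      rw [pvMerge_contains, hc1]; rfl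
    have hgd : (pvMerge e1 L R).getD k [] = v ++ R.getD k [] := by
      rw [PySem.Dict.getD_eq_get?_getD, pvMerge_get?, hLg]
      rfl
    rw [if_pos hcM]
    apply PySem.Dict.ext
    rw [PySem.Dict.items_insert_of_contains _ _ hcM]
    show (List.map _ (List.map _ L.items ++ List.map _ (List.filter _ R.items))) = _
    rw [List.map_append]
    show _ = List.map _ L.items ++ List.map _ (List.filter _ (R.insert k (R.getD k [] ++ t)).items)
    rw [pvFilter_insert _ _ _ _ hc1]
    congr 1
    · rw [List.map_map]
      apply List.map_congr_left
      intro q hq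
      by_cases hqk : q.1 = k
      · have hv : q.2 = v := pvVal_of_mem hL hLg q hq hqk
        simp [Function.comp_def, hqk, hv, hgd, PySem.Dict.getD_insert_self, List.append_assoc]
      · simp [Function.comp_def, hqk, PySem.Dict.getD_insert_of_ne _ _ _ hqk]
    · rw [List.map_map]
      apply List.map_congr_left
      intro q hq
      have hkeep := List.of_mem_filter hq
      have hqk : q.1 ≠ k := by
        intro h; rw [h, hc1] at hkeep; simp at hkeep
      simp [Function.comp_def, hqk]
  | none =>
    have hc1 := pvContains_false_of_get?_none hLg
    have hnomem := pvNotMem_of_get?_none hLg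
    cases hRg : R.get? k with
    | some w =>
      have hc2 := pvContains_true_of_get?_some hRg
      have hcM : (pvMerge e1 L R).contains k = true := by
        rw [pvMerge_contains, hc1, hc2]; rfl
      have hgd : (pvMerge e1 L R).getD k [] = e1 ++ w := by
        rw [PySem.Dict.getD_eq_get?_getD, pvMerge_get?, hLg, hRg]
        rfl
      have hRgd : R.getD k [] = w := by
        rw [PySem.Dict.getD_eq_get?_getD, hRg]; rfl
      rw [if_pos hcM]
      apply PySem.Dict.ext
      rw [PySem.Dict.items_insert_of_contains _ _ hcM]
      show (List.map _ (List.map _ L.items ++ List.map _ (List.filter _ R.items))) = _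
      rw [List.map_append]
      show _ = List.map _ L.items ++ List.map _ (List.filter _ (R.insert k (R.getD k [] ++ t)).items)
      rw [PySem.Dict.items_insert_of_contains _ _ hc2, List.filter_map]
      have hpred : ∀ q ∈ R.items,
          ((fun q : String × List String => !L.contains q.1) ∘
            (fun p => if (p.1 == k) = true then (k, R.getD k [] ++ t) else p)) q
            = (fun q : String × List String => !L.contains q.1) q := by
        intro q hq
        by_cases hqk : q.1 = k
        · simp [Function.comp_def, hqk, hc1]
        · simp [Function.comp_def, hqk]
      rw [List.filter_congr hpred]
      congr 1
      · rw [List.map_map]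
        apply List.map_congr_left
        intro q hq
        have hqk : q.1 ≠ k := hnomem q hq
        simp [Function.comp_def, hqk, PySem.Dict.getD_insert_of_ne _ _ _ hqk]
      · rw [List.map_map, List.map_map]
        apply List.map_congr_left
        intro q hq
        have hqm := List.mem_of_mem_filter hq
        by_cases hqk : q.1 = k
        · have hv : q.2 = w := pvVal_of_mem hR hRg q hqm hqk
          simp [Function.comp_def, hqk, hv, hgd, hRgd, List.append_assoc]
        · simp [Function.comp_def, hqk]
    | none =>
      have hc2 := pvContains_false_of_get?_none hRg
      have hcM : (pvMerge e1 L R).contains k = false := by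
        rw [pvMerge_contains, hc1, hc2]; rfl
      have hRgd : R.getD k [] = [] := by
        rw [PySem.Dict.getD_eq_get?_getD, hRg]; rfl
      rw [if_neg (by simp [hcM])]
      apply PySem.Dict.ext
      rw [PySem.Dict.items_insert_of_not_contains _ _ hcM]
      show (List.map _ L.items ++ List.map _ (List.filter _ R.items)) ++ _ = _
      show _ = List.map _ L.items ++ List.map _ (List.filter _ (R.insert k (R.getD k [] ++ t)).items)
      rw [PySem.Dict.items_insert_of_not_contains _ _ hc2, List.filter_append, List.map_append]
      have hone : List.filter (fun q : String × List String => !L.contains q.1) [(k, R.getD k [] ++ t)]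
          = [(k, R.getD k [] ++ t)] := by
        simp [hc1]
      rw [hone, hRgd]
      have hLeq : List.map (fun q : String × List String => (q.1, q.2 ++ (R.insert k ([] ++ t)).getD q.1 [])) L.items
          = List.map (fun q : String × List String => (q.1, q.2 ++ R.getD q.1 [])) L.items := by
        apply List.map_congr_left
        intro q hq
        have hqk : q.1 ≠ k := hnomem q hq
        simp [PySem.Dict.getD_insert_of_ne _ _ _ hqk]
      rw [List.append_assoc, hLeq]
      simp

theorem pvLoop2 (e1 : List String) (L : PySem.Dict String (List String))
    (l : List (String × List String)) :
    ∀ (R : PySem.Dict String (List String)) (ck : List String),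
    L.keys.Nodup → R.keys.Nodup →
    l.foldl (pvStepA e1) (pvMerge e1 L R, ck) =
      (pvMerge e1 L (l.foldl pvStepB R), ck ++ l.map (·.1)) := by
  induction l with
  | nil => intro R ck hL hR; simp
  | cons p l ih =>
    intro R ck hL hR
    rw [List.foldl_cons, pvMerge_step e1 L R ck p hL hR, List.foldl_cons]
    rw [ih (pvStepB R p) (ck ++ [p.1]) hL (PySem.Dict.nodup_keys_insert _ _ _ hR)]
    simp

theorem pvLoop3 (e2 : List String) (ck : List String) :
    ∀ (ks : List String) (d : PySem.Dict String (List String)),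
    d.keys.Nodup → (∀ k ∈ ks, d.contains k = true) → ks.Nodup →
    (ks.foldl (fun d k => if ck.contains k then d else d.insert k (d.getD k [] ++ e2)) d).items
      = d.items.map (fun p => if p.1 ∈ ks ∧ ¬ ck.contains p.1 = true then (p.1, p.2 ++ e2) else p) := by
  intro ks
  induction ks with
  | nil => intro d _ _ _; simp
  | cons k ks ih =>
    intro d hnd hsub hks
    rw [List.foldl_cons]
    by_cases hck : ck.contains k = true
    · rw [if_pos hck, ih d hnd (fun a ha => hsub a (List.mem_cons_of_mem _ ha)) hks.of_cons]
      apply List.map_congr_left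
      intro q hq
      have hck' : k ∈ ck := by simpa using hck
      by_cases hqk : q.1 = k
      · simp [hqk, hck']
      · simp [hqk]
    · rw [if_neg hck]
      have hc : d.contains k = true := hsub k List.mem_cons_self
      have hnd' : (d.insert k (d.getD k [] ++ e2)).keys.Nodup :=
        PySem.Dict.nodup_keys_insert _ _ _ hnd
      have hsub' : ∀ a ∈ ks, (d.insert k (d.getD k [] ++ e2)).contains a = true := by
        intro a ha
        rw [PySem.Dict.contains_insert]
        rw [hsub a (List.mem_cons_of_mem _ ha)]
        simp
      rw [ih _ hnd' hsub' hks.of_cons]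
      rw [PySem.Dict.items_insert_of_contains _ _ hc, List.map_map]
      apply List.map_congr_left
      intro q hq
      have hknks : k ∉ ks := (List.nodup_cons.mp hks).1
      by_cases hqk : q.1 = k
      · have hv : d.getD k [] = q.2 := by
          have : d.get? q.1 = some q.2 := by
            obtain ⟨a, b⟩ := q
            exact PySem.Dict.get?_of_mem_items d hq hnd
          rw [hqk] at this
          rw [PySem.Dict.getD_eq_get?_getD, this]
          rfl
        have hck' : k ∉ ck := by simpa using hck
        simp [Function.comp_def, hqk, hck', hv, hknks]
      · simp [Function.comp_def, hqk]

theorem pvContains_of_mem {d : PySem.Dict String (List String)} {q : String × List String}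
    (hq : q ∈ d.items) : d.contains q.1 = true := by
  simp only [PySem.Dict.contains, List.any_eq_true]
  exact ⟨q, hq, by simp⟩

theorem pvFoldB_contains (l : List (String × List String)) :
    ∀ (R : PySem.Dict String (List String)) (k : String),
    ((l.foldl pvStepB R).contains k = true) ↔ (R.contains k = true ∨ k ∈ l.map (·.1)) := by
  induction l with
  | nil => intro R k; simp
  | cons p l ih =>
    intro R k
    rw [List.foldl_cons]
    show ((l.foldl pvStepB (R.insert p.1 (R.getD p.1 [] ++ p.2))).contains k = true) ↔ _
    rw [ih]
    rw [PySem.Dict.contains_insert]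
    simp only [Bool.or_eq_true, beq_iff_eq, List.map_cons, List.mem_cons]
    tauto

theorem pvMerge_keys (e1 : List String) (L R : PySem.Dict String (List String)) :
    (pvMerge e1 L R).keys
      = L.keys ++ (R.items.filter (fun q => !L.contains q.1)).map (·.1) := by
  simp only [pvMerge, PySem.Dict.keys, List.map_append, List.map_map]
  rfl

theorem pvMerge_keys_nodup (e1 : List String) (L R : PySem.Dict String (List String))
    (hL : L.keys.Nodup) (hR : R.keys.Nodup) : (pvMerge e1 L R).keys.Nodup := by
  rw [pvMerge_keys]
  refine List.Nodup.append hL ?_ ?_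
  · have hsub : ((R.items.filter (fun q => !L.contains q.1)).map (·.1)).Sublist R.keys :=
      List.Sublist.map _ List.filter_sublist
    exact hR.sublist hsub
  · intro a ha hb
    obtain ⟨q, hq, hqa⟩ := List.mem_map.mp hb
    have hpred := List.of_mem_filter hq
    rw [hqa] at hpred
    have : L.contains a = true := by
      rw [PySem.Dict.contains_iff_mem_keys]
      exact ha
    rw [this] at hpred
    simp at hpred

theorem pvOut (d : PySem.Dict String (List String)) (hnd : d.keys.Nodup) :
    d.keys.foldl (fun res k => res ++ [[k] ++ d.getD k []]) []
      = d.items.map (fun p => [p.1] ++ p.2) := by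
  rw [PySem.List.foldl_append_singleton_eq_map, List.nil_append]
  conv_rhs => rw [PySem.Dict.items_eq_map_keys d hnd []]
  rw [List.map_map]
  rfl

theorem pvCore (e1 e2 : List String) (L : PySem.Dict String (List String))
    (hLnd : L.keys.Nodup) (l : List (String × List String)) :
    (let st := l.foldl (pvStepA e1) (L, ([] : List String));
     let d2 := st.1.keys.foldl
       (fun d one => if st.2.contains one then d else d.insert one (d.getD one [] ++ e2)) st.1;
     d2.keys.foldl (fun result one => result ++ [[one] ++ d2.getD one []]) [])
    = (L.keys ++ ((l.foldl pvStepB PySem.Dict.empty).keys.filter (fun k => !L.contains k))).map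
        (fun k => [k] ++ L.getD k e1 ++ (l.foldl pvStepB PySem.Dict.empty).getD k e2) := by
  have hRnd : (l.foldl pvStepB PySem.Dict.empty).keys.Nodup := by
    have h0 : l.foldl pvStepB PySem.Dict.empty
        = l.foldl (fun d x => d.insert (x.1) ((fun (d : PySem.Dict String (List String)) (p : String × List String) => d.getD p.1 [] ++ p.2) d x)) PySem.Dict.empty := rfl
    rw [h0]
    exact PySem.Dict.nodup_keys_foldl_insert_key l Prod.fst _ _ PySem.Dict.nodup_keys_empty
  set Rf := l.foldl pvStepB PySem.Dict.empty with hRf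
  have hst : l.foldl (pvStepA e1) (L, ([] : List String)) = (pvMerge e1 L Rf, l.map (·.1)) := by
    calc l.foldl (pvStepA e1) (L, ([] : List String))
        = l.foldl (pvStepA e1) (pvMerge e1 L PySem.Dict.empty, []) := by rw [pvMerge_empty]
      _ = (pvMerge e1 L Rf, [] ++ l.map (·.1)) :=
          pvLoop2 e1 L l PySem.Dict.empty [] hLnd PySem.Dict.nodup_keys_empty
      _ = (pvMerge e1 L Rf, l.map (·.1)) := by rw [List.nil_append]
  simp only [hst]
  have hMnd : (pvMerge e1 L Rf).keys.Nodup := pvMerge_keys_nodup e1 L Rf hLnd hRnd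
  have hcontains : ∀ k ∈ (pvMerge e1 L Rf).keys, (pvMerge e1 L Rf).contains k = true := by
    intro k hk
    rw [PySem.Dict.contains_iff_mem_keys]
    exact hk
  have hd2items := pvLoop3 e2 (l.map (·.1)) (pvMerge e1 L Rf).keys (pvMerge e1 L Rf)
    hMnd hcontains hMnd
  set d2 := (pvMerge e1 L Rf).keys.foldl
    (fun d one => if (l.map (·.1)).contains one then d
      else d.insert one (d.getD one [] ++ e2)) (pvMerge e1 L Rf) with hd2
  have hd2keys : d2.keys = (pvMerge e1 L Rf).keys := by
    show d2.items.map (·.1) = (pvMerge e1 L Rf).items.map (·.1)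
    rw [hd2items, List.map_map]
    apply List.map_congr_left
    intro q _
    simp only [Function.comp_def]
    split <;> rfl
  have hd2nd : d2.keys.Nodup := by rw [hd2keys]; exact hMnd
  rw [pvOut d2 hd2nd, hd2items, List.map_map]
  -- unfold the merge items into its two halves
  have hMitems : (pvMerge e1 L Rf).items
      = L.items.map (fun q => (q.1, q.2 ++ Rf.getD q.1 [])) ++
        (Rf.items.filter (fun q => !L.contains q.1)).map (fun q => (q.1, e1 ++ q.2)) := rfl
  rw [hMitems, List.map_append, List.map_map]
  -- B's key list, part 2, as a map over filtered items
  have hBkeys : Rf.keys.filter (fun k => !L.contains k)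
      = (Rf.items.filter (fun q => !L.contains q.1)).map (·.1) := by
    show (Rf.items.map (·.1)).filter (fun k => !L.contains k) = _
    rw [List.filter_map]
    rfl
  rw [hBkeys, List.map_append, List.map_map, List.map_map]
  have hckf : ∀ k : String, ((l.map (·.1)).contains k = true) ↔ (Rf.contains k = true) := by
    intro k
    rw [hRf, pvFoldB_contains]
    simp [List.contains_iff_mem]
  congr 1
  · -- left part: rows of list1
    show List.map _ L.items = L.keys.map _
    show _ = (L.items.map (·.1)).map _
    rw [List.map_map]
    apply List.map_congr_left
    intro q hq
    have hq1 : q.1 ∈ (pvMerge e1 L Rf).keys := by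
      rw [pvMerge_keys]
      exact List.mem_append_left _ (List.mem_map_of_mem hq)
    have hLgd : ∀ dflt, L.getD q.1 dflt = q.2 := by
      intro dflt
      obtain ⟨a, b⟩ := q
      exact PySem.Dict.getD_of_mem_items L hq hLnd dflt
    by_cases hrc : Rf.contains q.1 = true
    · have hck : (l.map (·.1)).contains q.1 = true := (hckf q.1).mpr hrc
      have hw : ∃ w, Rf.get? q.1 = some w := by
        rw [PySem.Dict.contains_eq_isSome_get?] at hrc
        exact Option.isSome_iff_exists.mp hrc
      obtain ⟨w, hw⟩ := hw
      have hgd1 : Rf.getD q.1 [] = w := by rw [PySem.Dict.getD_eq_get?_getD, hw]; rfl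
      have hgd2 : Rf.getD q.1 e2 = w := by rw [PySem.Dict.getD_eq_get?_getD, hw]; rfl
      have hcondF : ¬ (q.1 ∈ (pvMerge e1 L Rf).keys ∧ ¬ (l.map (·.1)).contains q.1 = true) :=
        fun h => h.2 hck
      simp only [Function.comp_def]
      rw [if_neg hcondF]
      simp [hLgd, hgd1, hgd2, List.append_assoc]
    · have hck : ¬ (l.map (·.1)).contains q.1 = true := fun h => hrc ((hckf q.1).mp h)
      have hrc' : Rf.contains q.1 = false := by
        cases h : Rf.contains q.1
        · rfl
        · exact absurd h hrc
      have hgd1 : Rf.getD q.1 [] = [] := PySem.Dict.getD_of_not_contains Rf [] hrc'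
      have hgd2 : Rf.getD q.1 e2 = e2 := PySem.Dict.getD_of_not_contains Rf e2 hrc'
      have hcondT : q.1 ∈ (pvMerge e1 L Rf).keys ∧ ¬ (l.map (·.1)).contains q.1 = true := ⟨hq1, hck⟩
      simp only [Function.comp_def]
      rw [if_pos hcondT]
      simp [hLgd, hgd1, hgd2, List.append_assoc]
  · -- right part: keys only in list2
    apply List.map_congr_left
    intro q hq
    have hqm : q ∈ Rf.items := List.mem_of_mem_filter hq
    have hpred := List.of_mem_filter hq
    have hLc : L.contains q.1 = false := by
      cases h : L.contains q.1
      · rfl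
      · rw [h] at hpred; simp at hpred
    have hq1 : q.1 ∈ (pvMerge e1 L Rf).keys := by
      rw [pvMerge_keys]
      exact List.mem_append_right _ (List.mem_map_of_mem hq)
    have hrc : Rf.contains q.1 = true := pvContains_of_mem hqm
    have hck : (l.map (·.1)).contains q.1 = true := (hckf q.1).mpr hrc
    have hcondF : ¬ (q.1 ∈ (pvMerge e1 L Rf).keys ∧ ¬ (l.map (·.1)).contains q.1 = true) :=
      fun h => h.2 hck
    have hLgd : L.getD q.1 e1 = e1 := PySem.Dict.getD_of_not_contains L e1 hLc
    have hRgd : Rf.getD q.1 e2 = q.2 := by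
      obtain ⟨a, b⟩ := q
      exact PySem.Dict.getD_of_mem_items Rf hqm hRnd e2
    simp only [Function.comp_def]
    rw [if_neg hcondF]
    simp [hLgd, hRgd, List.append_assoc]

theorem pvMainEq (l1 l2 : List (List String)) :
    mix_two_list_as_beside l1 l2 = mix_two_list_as_beside_alt l1 l2 := by
  unfold mix_two_list_as_beside mix_two_list_as_beside_alt
  dsimp only
  have hLnd : (l1.foldl (fun d one =>
      d.insert ((PySem.List.pyGet? one 0).getD "") (PySem.List.slice one (some 1) none))
      PySem.Dict.empty).keys.Nodup :=
    PySem.Dict.nodup_keys_foldl_insert_key l1 (fun one => (PySem.List.pyGet? one 0).getD "")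
      (fun _ one => PySem.List.slice one (some 1) none) _ PySem.Dict.nodup_keys_empty
  have h2 : l2.foldl (fun (st : PySem.Dict String (List String) × List String) one =>
      let k := (PySem.List.pyGet? one 0).getD ""
      let d := st.1
      let d' := if d.contains k then d.insert k (d.getD k [] ++ PySem.List.slice one (some 1) none)
                else d.insert k ((List.replicate ((((PySem.List.pyGet? l1 0).getD []).length : Int) - 1).toNat "") ++ PySem.List.slice one (some 1) none)
      (d', st.2 ++ [k]))
      (l1.foldl (fun d one =>
        d.insert ((PySem.List.pyGet? one 0).getD "") (PySem.List.slice one (some 1) none))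
        PySem.Dict.empty, [])
      = (l2.map (fun row => ((PySem.List.pyGet? row 0).getD "", PySem.List.slice row (some 1) none))).foldl
          (pvStepA (List.replicate ((((PySem.List.pyGet? l1 0).getD []).length : Int) - 1).toNat ""))
          (l1.foldl (fun d one =>
            d.insert ((PySem.List.pyGet? one 0).getD "") (PySem.List.slice one (some 1) none))
            PySem.Dict.empty, []) := by
    rw [List.foldl_map]
    rfl
  have h3 : l2.foldl (fun (d : PySem.Dict String (List String)) row =>
      let k := (PySem.List.pyGet? row 0).getD ""
      d.insert k (d.getD k [] ++ PySem.List.slice row (some 1) none)) PySem.Dict.empty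
      = (l2.map (fun row => ((PySem.List.pyGet? row 0).getD "", PySem.List.slice row (some 1) none))).foldl
          pvStepB PySem.Dict.empty := by
    rw [List.foldl_map]
    rfl
  rw [h2, h3]
  exact pvCore _ _ _ hLnd _

-- ===== VERDICT (by name: the statement is the Claim_ definition above) =====
theorem mix_two_list_as_beside_spec : Claim_equal_mix_two_list_as_beside := by
  intro l1 l2 _hdom _hpre
  show mix_two_list_as_beside l1 l2 = mix_two_list_as_beside_alt l1 l2
  exact pvMainEq l1 l2
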